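-- pv_equiv track=rewrite | github.com/choijaehoon1/programmers_level | src/test48_01.py | solution
-- ===== SOURCE A (Python) =====
-- from itertools import combinations
--
-- def solution(nums):
--     answer = 0
--     cnt = len(nums) // 2
--     combi = list(combinations(nums,cnt))
--     for i in combi:
--         tmp = list(set(i))
--         num  = len(tmp)
--         answer = max(answer,num)
--     return answer
-- ===== SOURCE B (Python) =====
-- def solution(nums):
--     # The largest number of distinct values in a half-size selection is
--     # capped by the selection size and by the total number of distinct values,
--     # and both caps are simultaneously achievable.
--     return min(len(nums) // 2, len(set(nums)))
-- ===== Notes on version B (the rewrite author's own statement) =====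
-- stated objective: faster
-- what changed: Replaces the exhaustive enumeration of all C(n, n/2) combinations (taking the max distinct count of each) with the closed form min(n//2, number of distinct elements).
import Mathlib
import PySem

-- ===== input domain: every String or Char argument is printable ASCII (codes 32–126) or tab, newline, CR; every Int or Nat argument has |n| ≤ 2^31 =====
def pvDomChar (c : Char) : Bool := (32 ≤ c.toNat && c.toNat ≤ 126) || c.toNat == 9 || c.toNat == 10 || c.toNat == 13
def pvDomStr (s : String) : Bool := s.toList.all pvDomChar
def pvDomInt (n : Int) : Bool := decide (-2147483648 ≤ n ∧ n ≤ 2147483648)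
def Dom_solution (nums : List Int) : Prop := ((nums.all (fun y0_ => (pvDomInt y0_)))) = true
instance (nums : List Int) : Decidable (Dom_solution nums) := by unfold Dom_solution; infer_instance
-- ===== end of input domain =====

-- B replaces A's enumeration of all half-size combinations with the closed form
-- min(len(nums)//2, len(set(nums))) (objective: faster, asymptotically).

-- ===== PORT A =====
-- itertools.combinations(nums, cnt) ported as Mathlib's List.sublistsLen (same
-- multiset of combinations; the loop below only takes a max, order-independent).
def solution (nums : List Int) : Int :=
  let cnt : Nat := nums.length / 2
  let combi : List (List Int) := List.sublistsLen cnt nums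
  combi.foldl (fun answer i => max answer ((PySem.Set.ofList i).length : Int)) 0

-- ===== PORT B =====
def solution_alt (nums : List Int) : Int :=
  min ((nums.length / 2 : Nat) : Int) ((PySem.Set.ofList nums).length : Int)

-- ===== PRECONDITION & SPEC =====
def Spec_solution (nums : List Int) (out : Int) : Prop := out = solution_alt nums
instance (nums : List Int) (out : Int) : Decidable (Spec_solution nums out) := by unfold Spec_solution; infer_instance

-- ===== CLAIM (what is proved, stated in full; the proofs are below) =====
def Claim_equal_solution : Prop := ∀ (nums : List Int), Dom_solution nums → Spec_solution nums (solution nums)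

-- ===== LEMMAS AND PROOFS =====

-- len(set(l)) = card of the value set
theorem ofList_length_eq (l : List Int) :
    (PySem.Set.ofList l).length = l.toFinset.card := by
  have hperm : (PySem.Set.ofList l).Perm l.dedup :=
    (List.perm_ext_iff_of_nodup (PySem.Set.nodup_ofList l) (List.nodup_dedup l)).2
      (fun a => by simp [PySem.Set.mem_ofList, List.mem_dedup])
  rw [hperm.length_eq, List.card_toFinset]

theorem toFinset_subset_of_sublist {s l : List Int} (h : s.Sublist l) :
    s.toFinset ⊆ l.toFinset := by
  intro a ha
  rw [List.mem_toFinset] at *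
  exact h.subset ha

-- the fold grows from its initial value
theorem init_le_foldl (L : List (List Int)) (f : List Int → Int) (init : Int) :
    init ≤ L.foldl (fun a x => max a (f x)) init := by
  induction L generalizing init with
  | nil => simp
  | cons b t ih =>
      simp only [List.foldl_cons]
      exact le_trans (le_max_left _ _) (ih (max init (f b)))

theorem le_foldl_max (L : List (List Int)) (f : List Int → Int) (init : Int)
    (x : List Int) (hx : x ∈ L) :
    f x ≤ L.foldl (fun a y => max a (f y)) init := by
  induction L generalizing init with
  | nil => cases hx
  | cons b t ih =>
      simp only [List.foldl_cons]
      rcases List.mem_cons.1 hx with rfl | hxt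
      · exact le_trans (le_max_right _ _) (init_le_foldl t f _)
      · exact ih _ hxt

theorem foldl_max_le (L : List (List Int)) (f : List Int → Int) (b init : Int)
    (h0 : init ≤ b) (h : ∀ x ∈ L, f x ≤ b) :
    L.foldl (fun a x => max a (f x)) init ≤ b := by
  induction L generalizing init with
  | nil => simpa
  | cons c t ih =>
      simp only [List.foldl_cons]
      exact ih _ (max_le h0 (h c (List.mem_cons_self))) (fun x hx => h x (List.mem_cons_of_mem _ hx))

-- a length-k sublist covering all values exists once k >= #distinct
theorem exists_covering_sublist :
    ∀ (n : Nat) (l : List Int), l.length = n → ∀ k, l.dedup.length ≤ k → k ≤ l.length →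
      ∃ s : List Int, s.Sublist l ∧ s.length = k ∧ s.toFinset = l.toFinset := by
  intro n
  induction n using Nat.strong_induction_on with
  | _ n ih =>
    intro l hl k hdk hkl
    by_cases hkeq : k = l.length
    · exact ⟨l, List.Sublist.refl l, hkeq.symm, rfl⟩
    · have hklt : k < l.length := lt_of_le_of_ne hkl hkeq
      have hnd : ¬ l.Nodup := by
        intro hnd
        have h := List.dedup_eq_self.2 hnd
        rw [h] at hdk
        omega
      obtain ⟨x, hx⟩ := List.exists_duplicate_iff_not_nodup.2 hnd
      have hxmem : x ∈ l := hx.mem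
      have hcount : 2 ≤ List.count x l := List.duplicate_iff_two_le_count.1 hx
      have hxmem' : x ∈ l.erase x := by
        rw [← List.count_pos_iff, List.count_erase_self]
        omega
      have hsub : (l.erase x).Sublist l := List.erase_sublist
      have hlen : (l.erase x).length = l.length - 1 := List.length_erase_of_mem hxmem
      have hfin : (l.erase x).toFinset = l.toFinset := by
        apply Finset.Subset.antisymm
        · exact toFinset_subset_of_sublist hsub
        · intro a ha
          rw [List.mem_toFinset] at ha ⊢
          by_cases hax : a = x
          · subst hax; exact hxmem'
          · exact (List.mem_erase_of_ne hax).2 ha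
      have hded : (l.erase x).dedup.length = l.dedup.length := by
        rw [← List.card_toFinset, ← List.card_toFinset, hfin]
      have hpos : 1 ≤ l.length := List.length_pos_of_mem hxmem
      obtain ⟨s, hs1, hs2, hs3⟩ :=
        ih (l.erase x).length (by omega) (l.erase x) rfl k (by omega) (by omega)
      exact ⟨s, hs1.trans hsub, hs2, hs3.trans hfin⟩

-- main combinatorial existence: some combination attains min(cnt, #distinct)
theorem exists_best (l : List Int) (k : Nat) (hk : k ≤ l.length) :
    ∃ s : List Int, s.Sublist l ∧ s.length = k ∧ s.toFinset.card = min k l.toFinset.card := by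
  by_cases h : l.toFinset.card ≤ k
  · obtain ⟨s, h1, h2, h3⟩ :=
      exists_covering_sublist l.length l rfl k (by rw [← List.card_toFinset]; exact h) hk
    refine ⟨s, h1, h2, ?_⟩
    rw [h3, min_eq_right h]
  · rw [not_le] at h
    have hcard : l.toFinset.card = l.dedup.length := List.card_toFinset l
    refine ⟨l.dedup.take k, (List.take_sublist _ _).trans (List.dedup_sublist l), ?_, ?_⟩
    · rw [List.length_take]; omega
    · have hnd : (l.dedup.take k).Nodup :=
        (List.take_sublist _ _).nodup (List.nodup_dedup l)
      rw [List.card_toFinset, List.dedup_eq_self.2 hnd, List.length_take, min_eq_left h.le]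
      omega

theorem solution_eq (nums : List Int) : solution nums = solution_alt nums := by
  unfold solution solution_alt
  set k := nums.length / 2 with hk
  have hkle : k ≤ nums.length := Nat.div_le_self _ _
  obtain ⟨s, hs1, hs2, hs3⟩ := exists_best nums k hkle
  have hsmem : s ∈ List.sublistsLen k nums := List.mem_sublistsLen.2 ⟨hs1, hs2⟩
  rw [ofList_length_eq nums]
  apply le_antisymm
  · apply foldl_max_le
    · exact le_min (Int.natCast_nonneg _) (Int.natCast_nonneg _)
    · intro x hx
      obtain ⟨hxs, hxl⟩ := List.mem_sublistsLen.1 hx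
      rw [ofList_length_eq]
      apply le_min
      · have h1 : x.toFinset.card ≤ k := by
          rw [List.card_toFinset]
          calc x.dedup.length ≤ x.length := (List.dedup_sublist x).length_le
            _ = k := hxl
        exact_mod_cast h1
      · have h2 : x.toFinset.card ≤ nums.toFinset.card :=
          Finset.card_le_card (toFinset_subset_of_sublist hxs)
        exact_mod_cast h2
  · have hle := le_foldl_max (List.sublistsLen k nums)
      (fun i => ((PySem.Set.ofList i).length : Int)) 0 s hsmem
    simp only [] at hle
    rw [ofList_length_eq s, hs3] at hle
    calc min (k : Int) (nums.toFinset.card : Int)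
        = ((min k nums.toFinset.card : Nat) : Int) := by rw [Nat.cast_min]
      _ ≤ _ := hle

-- ===== VERDICT (by name: the statement is the Claim_ definition above) =====
theorem solution_spec : Claim_equal_solution := by
  intro nums _
  unfold Spec_solution
  exact solution_eq nums
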